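-- pv_equiv track=rewrite | github.com/GenisGenerik/Belajar-Python- | perpustakaan_sederhana_GUI/Data/edit_data.py | update_id
-- ===== SOURCE A (Python) =====
-- def update_id (isi:list[str]) ->list[str] :
--
--     count = 1
--     hasil:list[str] = []
--     for i in isi :
--         split = i.split(",")
--         split[0] = str(count)
--         count+=1
--         hasil.append(gabung(split))
--
--
--     return hasil
--
-- def gabung(split:list[str])->str :
--     data_baru:str =""
--     for i in split :
--         data_baru += i + ","
--     return data_baru[:-1]
-- ===== SOURCE B (Python) =====
-- def update_id(isi: list[str]) -> list[str]:
--     def renumber(n: int, line: str) -> str: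
--         head, sep, rest = line.partition(',')
--         return str(n) + sep + rest
--     return [renumber(n, line) for n, line in enumerate(isi, 1)]
-- ===== Notes on version B (the rewrite author's own statement) =====
-- stated objective: idiomatic
-- what changed: Replaced the split-into-fields / overwrite field 0 / manual rejoin-with-trailing-comma-then-strip pipeline by a single comprehension over enumerate(isi, 1) that uses line.partition(',') and keeps only the counter, never building a field list.
import Mathlib
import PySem

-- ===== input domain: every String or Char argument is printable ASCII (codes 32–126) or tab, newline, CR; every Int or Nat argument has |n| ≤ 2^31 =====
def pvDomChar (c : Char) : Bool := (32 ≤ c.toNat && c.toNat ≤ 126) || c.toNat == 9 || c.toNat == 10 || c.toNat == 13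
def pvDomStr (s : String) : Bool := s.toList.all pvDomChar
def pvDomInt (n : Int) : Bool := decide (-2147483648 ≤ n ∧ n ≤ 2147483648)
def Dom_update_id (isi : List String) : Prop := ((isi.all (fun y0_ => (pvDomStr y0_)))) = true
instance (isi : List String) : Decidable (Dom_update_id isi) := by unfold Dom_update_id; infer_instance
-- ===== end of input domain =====

-- B renumbers each line via partition(',') in one comprehension, dropping the split/rejoin helper (idiomatic; return value only).

-- ===== PORT A =====
-- gabung: data_baru += i + "," over the fields, then data_baru[:-1]
def gabung (split : List (List Char)) : List Char :=
  PySem.List.slice (split.foldl (fun data_baru i => data_baru ++ i ++ [',']) []) none (some (-1))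

def update_id (isi : List String) : List String :=
  (isi.foldl (fun (st : Int × List String) i =>
      let split := PySem.Chars.splitOn i.toList [',']
      let split := split.set 0 (PySem.Int.toChars st.1)   -- split[0] = str(count)
      (st.1 + 1, st.2 ++ [String.ofList (gabung split)]))
    (1, [])).2

-- ===== PORT B =====
-- line.partition(',') — hand port (PySem has no partition), exact: (before, sep, after) at the FIRST ','
def pyPartitionComma (cs : List Char) : List Char × List Char × List Char :=
  match cs with
  | [] => ([], [], [])
  | c :: rest =>
    if c = ',' then ([], [','], rest)
    else
      let (h, s, r) := pyPartitionComma rest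
      (c :: h, s, r)

def renumber (n : Int) (line : String) : String :=
  let (_, sep, rest) := pyPartitionComma line.toList
  String.ofList (PySem.Int.toChars n ++ sep ++ rest)

def update_id_alt (isi : List String) : List String :=
  (PySem.List.enumerate isi 1).map (fun p => renumber p.1 p.2)

-- ===== PRECONDITION & SPEC =====
def Spec_update_id (isi : List String) (out : List String) : Prop := out = update_id_alt isi
instance (isi : List String) (out : List String) : Decidable (Spec_update_id isi out) := by unfold Spec_update_id; infer_instance

-- ===== CLAIM (what is proved, stated in full; the proofs are below) =====
def Claim_equal_update_id : Prop := ∀ (isi : List String), Dom_update_id isi → Spec_update_id isi (update_id isi)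

-- ===== LEMMAS AND PROOFS =====

-- structural model of splitOn with a one-char separator ','
def mySplit (pre : List Char) (cs : List Char) : List (List Char) :=
  match cs with
  | [] => [pre]
  | c :: rest => if c = ',' then pre :: mySplit [] rest else mySplit (pre ++ [c]) rest

lemma go_comma (fuel : Nat) : ∀ (l cur : List Char) (acc : List (List Char)),
    l.length < fuel →
    PySem.Chars.splitOn.go [','] fuel l cur acc = acc.reverse ++ mySplit cur.reverse l := by
  induction fuel with
  | zero => intro l cur acc h; omega
  | succ fuel ih =>
    intro l cur acc h
    cases l with
    | nil => simp [PySem.Chars.splitOn.go, mySplit]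
    | cons c rest =>
      by_cases hc : c = ','
      · subst hc
        simp only [PySem.Chars.splitOn.go, List.isPrefixOf, mySplit]
        simp [ih rest [] (cur.reverse :: acc) (by simp at h ⊢; omega)]
      · simp only [PySem.Chars.splitOn.go, mySplit]
        have hpre : List.isPrefixOf [','] (c :: rest) = false := by
          simp [List.isPrefixOf]; exact fun h => hc h.symm
        rw [hpre]
        simp only [if_neg hc, Bool.false_eq_true, if_false]
        rw [ih rest (c :: cur) acc (by simp at h ⊢; omega)]
        simp

lemma splitOn_comma (cs : List Char) :
    PySem.Chars.splitOn cs [','] = mySplit [] cs := by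
  have := go_comma (cs.length + 1) cs [] [] (by omega)
  simpa [PySem.Chars.splitOn] using this

-- interleaving of the tail fields with leading commas
def interTail : List (List Char) → List Char
  | [] => []
  | x :: xs => ',' :: (x ++ interTail xs)

lemma foldl_flat (t : List (List Char)) : ∀ (a0 : List Char),
    t.foldl (fun data_baru i => data_baru ++ i ++ [',']) a0
      = a0 ++ (t.map (· ++ [','])).flatten := by
  induction t with
  | nil => intro a0; simp
  | cons x xs ih => intro a0; simp only [List.foldl_cons, List.map_cons, List.flatten_cons]; rw [ih]; simp

lemma comma_flat (t : List (List Char)) :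
    [','] ++ (t.map (· ++ [','])).flatten = interTail t ++ [','] := by
  induction t with
  | nil => simp [interTail]
  | cons x xs ih =>
    simp only [List.singleton_append] at ih
    simp only [List.map_cons, List.flatten_cons, interTail,
      List.cons_append, List.append_assoc, List.nil_append]
    rw [ih]

lemma interTail_flat (cs : List Char) : ∀ pre,
    interTail (mySplit pre cs) = ',' :: (pre ++ cs) := by
  induction cs with
  | nil => intro pre; simp [mySplit, interTail]
  | cons c rest ih =>
    intro pre
    by_cases hc : c = ','
    · subst hc; simp [mySplit, interTail, ih]
    · simp [mySplit, hc, ih, List.append_assoc]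

lemma gabung_cons (g : List Char) (t : List (List Char)) :
    gabung (g :: t) = g ++ interTail t := by
  unfold gabung
  rw [PySem.List.slice_to_neg_one]
  rw [foldl_flat]
  simp only [List.nil_append, List.map_cons, List.flatten_cons, List.append_assoc]
  rw [comma_flat, ← List.append_assoc]
  exact List.dropLast_concat

lemma mySplit_ne_nil (pre cs : List Char) : mySplit pre cs ≠ [] := by
  induction cs generalizing pre with
  | nil => simp [mySplit]
  | cons c rest ih =>
    by_cases hc : c = ',' <;> simp [mySplit, hc, ih]

lemma interTail_mySplit (cs : List Char) : ∀ pre,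
    interTail (mySplit pre cs).tail = cs.dropWhile (· ≠ ',') := by
  induction cs with
  | nil => intro pre; simp [mySplit, interTail]
  | cons c rest ih =>
    intro pre
    by_cases hc : c = ','
    · subst hc
      simp [mySplit, List.dropWhile, interTail_flat]
    · simp [mySplit, hc, List.dropWhile, ih]

lemma partition_suffix (cs : List Char) :
    (pyPartitionComma cs).2.1 ++ (pyPartitionComma cs).2.2 = cs.dropWhile (· ≠ ',') := by
  induction cs with
  | nil => simp [pyPartitionComma]
  | cons c rest ih =>
    by_cases hc : c = ','
    · subst hc; simp [pyPartitionComma, List.dropWhile]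
    · simp [pyPartitionComma, hc, List.dropWhile, ih]

lemma per_line (n : Int) (s : String) :
    String.ofList (gabung ((PySem.Chars.splitOn s.toList [',']).set 0 (PySem.Int.toChars n)))
      = renumber n s := by
  rw [splitOn_comma]
  obtain ⟨h, t, ht⟩ : ∃ h t, mySplit [] s.toList = h :: t := by
    cases hm : mySplit [] s.toList with
    | nil => exact absurd hm (mySplit_ne_nil _ _)
    | cons a b => exact ⟨a, b, rfl⟩
  rw [ht]
  simp only [List.set]
  rw [gabung_cons]
  have htail : interTail t = s.toList.dropWhile (· ≠ ',') := by
    have := interTail_mySplit s.toList []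
    rw [ht] at this; exact this
  unfold renumber
  rw [htail, ← partition_suffix s.toList]
  rcases hp : pyPartitionComma s.toList with ⟨a, b, r⟩
  simp

lemma loop_eq (isi : List String) : ∀ (c : Int) (acc : List String),
    (isi.foldl (fun (st : Int × List String) i =>
        let split := PySem.Chars.splitOn i.toList [',']
        let split := split.set 0 (PySem.Int.toChars st.1)
        (st.1 + 1, st.2 ++ [String.ofList (gabung split)]))
      (c, acc)).2
    = acc ++ (PySem.List.enumerate isi c).map (fun p => renumber p.1 p.2) := by
  induction isi with
  | nil => intro c acc; simp [PySem.List.enumerate_nil]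
  | cons x xs ih =>
    intro c acc
    rw [PySem.List.enumerate_cons]
    simp only [List.foldl_cons, List.map_cons]
    rw [ih (c + 1)]
    simp [per_line]

-- ===== VERDICT (by name: the statement is the Claim_ definition above) =====
theorem update_id_spec : Claim_equal_update_id := by
  intro isi _
  unfold Spec_update_id update_id update_id_alt
  rw [loop_eq isi 1 []]
  simp
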